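-- pv_equiv track=rewrite | github.com/cizzit/wiki | wiki.py | valid_content
-- ===== SOURCE A (Python) =====
-- def valid_content(content):
--     for (i, o) in (("<html", "html"),
--         ('<body', "body"),
--         ("<head", "head"),
--         ("<link", "link"),
--         ("<title", "title"),
--         ("<iframe", "iframe"),
--         ("<form", "form"),
--         ("<script", "puppies"),
--         ("</body", "/body"),
--         ("</html", "/html"),
--         ("<div", "div"),
--         ("</div", "/div")
--         ):
--         content = content.replace(i, o)
--     return content
-- ===== SOURCE B (Python) =====
-- # One table-driven left-to-right scan instead of twelve sequential full-string passes.
-- RULES = {"<html": "html", "<body": "body", "<head": "head", "<link": "link",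
--          "<title": "title", "<iframe": "iframe", "<form": "form", "<script": "puppies",
--          "</body": "/body", "</html": "/html", "<div": "div", "</div": "/div"}
--
--
-- def valid_content(content):
--     out = []
--     i = 0
--     n = len(content)
--     while i < n:
--         c = content[i]
--         if c == "<":
--             for k, v in RULES.items():
--                 if content.startswith(k, i):
--                     out.append(v)
--                     i += len(k)
--                     break
--             else:
--                 out.append(c)
--                 i += 1
--         else:
--             out.append(c)
--             i += 1
--     return "".join(out)
-- ===== Notes on version B (the rewrite author's own statement) =====
-- stated objective: alternative
-- what changed: twelve sequential full-string .replace passes are replaced by a table of rules and ONE left-to-right scan that emits each replacement in a single pass; Pre_ excludes contents containing one of five substrings on which A's sequential passes cascade (an earlier replacement's output merges with adjacent text into a later tag pattern that a later pass rewrites again), a corner where single-pass and sequential substitution legitimately disagree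
-- outside the precondition, e.g. on valid_content('</<html'): A returns '/html', B returns '</html'
import Mathlib
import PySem

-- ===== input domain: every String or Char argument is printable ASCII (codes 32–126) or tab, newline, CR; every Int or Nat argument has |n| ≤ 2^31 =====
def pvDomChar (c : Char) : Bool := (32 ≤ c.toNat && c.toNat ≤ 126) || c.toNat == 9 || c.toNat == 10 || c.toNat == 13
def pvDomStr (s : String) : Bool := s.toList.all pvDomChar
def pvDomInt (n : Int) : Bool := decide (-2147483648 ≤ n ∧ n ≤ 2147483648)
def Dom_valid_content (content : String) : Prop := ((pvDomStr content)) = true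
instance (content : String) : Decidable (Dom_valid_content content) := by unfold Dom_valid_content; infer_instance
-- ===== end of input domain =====

-- B replaces A's twelve sequential full-string replace passes by one table-driven
-- left-to-right scan (alternative algorithm, equal on Pre_; not claimed faster).

-- ===== PORT A =====
def pvRules : List (String × String) :=
  [("<html", "html"), ("<body", "body"), ("<head", "head"), ("<link", "link"),
   ("<title", "title"), ("<iframe", "iframe"), ("<form", "form"), ("<script", "puppies"),
   ("</body", "/body"), ("</html", "/html"), ("<div", "div"), ("</div", "/div")]

def valid_content (content : String) : String :=
  pvRules.foldl (fun acc p => PySem.Str.replace acc p.1 p.2) content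

-- ===== PORT B =====
def pvRulesC : List (List Char × List Char) :=
  [("<html".toList, "html".toList), ("<body".toList, "body".toList),
   ("<head".toList, "head".toList), ("<link".toList, "link".toList),
   ("<title".toList, "title".toList), ("<iframe".toList, "iframe".toList),
   ("<form".toList, "form".toList), ("<script".toList, "puppies".toList),
   ("</body".toList, "/body".toList), ("</html".toList, "/html".toList),
   ("<div".toList, "div".toList), ("</div".toList, "/div".toList)]

theorem pvRulesC_key_pos : ∀ p ∈ pvRulesC, 0 < p.1.length := by decide

-- the single left-to-right scan of Source B (first matching rule fires, scan resumes after it)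
def pvScan : List Char → List Char
  | [] => []
  | c :: t =>
    if c = '<' then
      match h : pvRulesC.find? (fun p => p.1.isPrefixOf (c :: t)) with
      | some (k, v) => v ++ pvScan ((c :: t).drop k.length)
      | none => c :: pvScan t
    else c :: pvScan t
  termination_by s => s.length
  decreasing_by
  · have hm := List.mem_of_find?_eq_some h
    have := pvRulesC_key_pos _ hm
    simp at this ⊢
    omega
  · simp
  · simp

def valid_content_alt (content : String) : String := String.ofList (pvScan content.toList)

-- ===== PRECONDITION & SPEC =====
-- Pre_ excludes contents containing one of five substrings, on which A's twelve sequential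
-- passes cascade (an earlier replacement's output merges with adjacent text into a later tag
-- pattern that a later pass rewrites again); a single simultaneous left-to-right substitution
-- legitimately disagrees with the sequential passes there.
def pvPats : List (List Char) :=
  ["</<html".toList, "</<body".toList, "</htm<link".toList, "<scrip<title".toList, "</<div".toList]

def Pre_valid_content (content : String) : Prop := ∀ p ∈ pvPats, ¬ p <:+: content.toList
instance (content : String) : Decidable (Pre_valid_content content) := by
  unfold Pre_valid_content; infer_instance

def pvWitness_valid_content : String := "<div>hi</div><script>alert(1)</script>"

def Spec_valid_content (content : String) (out : String) : Prop := out = valid_content_alt content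
instance (content : String) (out : String) : Decidable (Spec_valid_content content out) := by
  unfold Spec_valid_content; infer_instance

-- ===== CLAIM (what is proved, stated in full; the proofs are below) =====
def Claim_equal_valid_content : Prop :=
  ∀ (content : String), Dom_valid_content content → Pre_valid_content content →
    Spec_valid_content content (valid_content content)

-- ===== LEMMAS AND PROOFS =====

-- a structurally-recursive restatement of PySem.Chars.replace (nonempty pattern)
def pvRepl (k o : List Char) : List Char → List Char
  | [] => []
  | c :: t =>
    if k.isPrefixOf (c :: t) then o ++ pvRepl k o (t.drop (k.length - 1))
    else c :: pvRepl k o t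
  termination_by s => s.length
  decreasing_by all_goals (simp [List.length_drop]; try omega)

theorem pvGo_eq (k o : List Char) (hk : k ≠ []) :
    ∀ (fuel : Nat) (l acc : List Char), l.length ≤ fuel →
      PySem.Chars.replace.go k o fuel l acc = acc.reverse ++ pvRepl k o l := by
  intro fuel
  induction fuel with
  | zero =>
    intro l acc hl
    have : l = [] := List.length_eq_zero_iff.mp (Nat.le_zero.mp hl)
    subst this
    simp [PySem.Chars.replace.go, pvRepl]
  | succ n ih =>
    intro l acc hl
    cases l with
    | nil => simp [PySem.Chars.replace.go, pvRepl]
    | cons c t =>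
      rw [PySem.Chars.replace.go]
      by_cases hp : k.isPrefixOf (c :: t)
      · simp only [hp, if_true]
        obtain ⟨m, hm⟩ : ∃ m, k.length = m + 1 := by
          cases k with
          | nil => exact absurd rfl hk
          | cons a b => exact ⟨b.length, by simp⟩
        have hdrop : (c :: t).drop k.length = t.drop (k.length - 1) := by
          rw [hm]; simp
        have hlen : ((c :: t).drop k.length).length ≤ n := by
          simp only [List.length_drop, List.length_cons, hm]
          simp at hl
          omega
        rw [ih _ _ hlen, pvRepl]
        simp [hp, hdrop]
      · simp only [hp]
        have hlen : t.length ≤ n := by simp at hl; omega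
        rw [ih _ _ hlen, pvRepl]
        simp [hp]

theorem pvReplace_eq (k o s : List Char) (hk : k ≠ []) :
    PySem.Chars.replace s k o = pvRepl k o s := by
  rw [PySem.Chars.replace]
  simp [List.isEmpty_iff, hk]
  rw [pvGo_eq k o hk s.length s [] le_rfl]
  simp

-- a '<'-started pattern never matches inside a '<'-free prefix
theorem pvRepl_ltfree (k o : List Char) (hk : k.head? = some '<') :
    ∀ (p z : List Char), '<' ∉ p → pvRepl k o (p ++ z) = p ++ pvRepl k o z := by
  intro p
  induction p with
  | nil => simp
  | cons c p' ih =>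
    intro z hp
    have hc : c ≠ '<' := fun h => hp (h ▸ List.mem_cons_self ..)
    have hnp : ¬ k.isPrefixOf (c :: (p' ++ z)) := by
      intro h
      cases k with
      | nil => simp at hk
      | cons a b =>
        simp at hk
        subst hk
        rw [List.isPrefixOf_iff_prefix] at h
        rcases h with ⟨r, hr⟩
        simp at hr
        exact hc hr.1.symm
    rw [List.cons_append, pvRepl, ih z (fun h => hp (List.mem_cons_of_mem _ h))]
    simp [hnp]

-- ---- block decomposition: a string '<'-headed string is a sequence of '<'-started blocks ----
def pvBlocks : List Char → List (List Char)
  | [] => []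
  | _ :: t => t.takeWhile (· ≠ '<') :: pvBlocks (t.dropWhile (· ≠ '<'))
  termination_by s => s.length
  decreasing_by simp [List.length_dropWhile_le]

theorem pvBlocks_join : ∀ s : List Char, s.head? = some '<' →
    s = (pvBlocks s).flatMap (fun q => '<' :: q) := by
  intro s
  induction s using pvBlocks.induct with
  | case1 => intro h; simp at h
  | case2 c t ih =>
    intro h
    simp only [List.head?_cons, Option.some.injEq] at h
    subst h
    rw [pvBlocks]
    simp only [List.flatMap_cons, List.cons_append]
    have hsplit := List.takeWhile_append_dropWhile (p := fun x => decide (x ≠ '<')) (l := t)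
    by_cases hd : t.dropWhile (fun x => decide (x ≠ '<')) = []
    · rw [hd] at hsplit
      rw [List.append_nil] at hsplit
      rw [hd, pvBlocks]
      simp only [List.flatMap_nil, List.append_nil]
      rw [hsplit]
    · have hhead : (t.dropWhile (fun x => decide (x ≠ '<'))).head hd = '<' := by
        have := List.head_dropWhile_not (p := fun x => decide (x ≠ '<')) hd
        simpa using this
      have hh : (t.dropWhile (fun x => decide (x ≠ '<'))).head? = some '<' := by
        rw [List.head?_eq_some_head hd, hhead]
      conv_rhs => rw [← ih hh]
      conv_lhs => rw [← hsplit]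

theorem pvBlocks_ltfree : ∀ s : List Char, ∀ q ∈ pvBlocks s, '<' ∉ q := by
  intro s
  induction s using pvBlocks.induct with
  | case1 => simp [pvBlocks]
  | case2 c t ih =>
    rw [pvBlocks]
    intro q hq
    rcases List.mem_cons.mp hq with h | h
    · subst h
      intro hmem
      have := List.mem_takeWhile_imp hmem
      simp at this
    · exact ih q h

-- ---- the per-pass slot machine modelling A's sequential passes ----
inductive PvSlot where
  | pend : List Char → PvSlot
  | done : List Char → List Char → List Char → PvSlot

def pvQ : PvSlot → List Char
  | .pend q => q
  | .done _ _ q => q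

def pvRenderS : PvSlot → List Char
  | .pend q => '<' :: q
  | .done k o q => o ++ q.drop (k.length - 1)

def pvRender (st : List PvSlot) : List Char := st.flatMap pvRenderS

def pvStep (k o : List Char) : PvSlot → PvSlot
  | .pend q => if (k.drop 1).isPrefixOf q then .done k o q else .pend q
  | s => s

-- the final value of one block under either algorithm
def pvHb (q : List Char) : List Char :=
  match pvRulesC.find? (fun p => (p.1.drop 1).isPrefixOf q) with
  | some (k, o) => o ++ q.drop (k.length - 1)
  | none => '<' :: q

-- adjacent-block condition under which A's passes cascade (matches the five pvPats)
def pvBad (q q' : List Char) : Prop :=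
  (q = ['/'] ∧ ("html".toList <+: q' ∨ "body".toList <+: q' ∨ "div".toList <+: q'))
  ∨ (q = "/htm".toList ∧ "link".toList <+: q')
  ∨ (q = "scrip".toList ∧ "title".toList <+: q')

def pvWF (P : List (List Char × List Char)) (st : List PvSlot) : Prop :=
  ∀ sl ∈ st, ('<' ∉ pvQ sl) ∧ (∀ k o q, sl = .done k o q → (k, o) ∈ P ∧ (k.drop 1) <+: q)

-- ---- concrete facts about the rule table (checked by decide) ----
theorem pvF_shape : ∀ p ∈ pvRulesC,
    p.1.head? = some '<' ∧ '<' ∉ p.1.drop 1 ∧ p.1.drop 1 ≠ [] ∧ '<' ∉ p.2 ∧ p.2 ≠ [] ∧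
    p.1.length ≤ 7 := by decide

def pvSpanConc (q tj : List Char) : Prop :=
  (q = ['/'] ∧ (tj = "html".toList ∨ tj = "body".toList ∨ tj = "div".toList))
  ∨ (q = "/htm".toList ∧ tj = "link".toList)
  ∨ (q = "scrip".toList ∧ tj = "title".toList)

theorem pvF_span_b :
    (pvRulesC.all (fun pJ => pvRulesC.all (fun pI =>
      !([pJ, pI].isSublist pvRulesC) ||
      (List.range 8).all (fun n =>
        ((pI.1.drop 1).drop n).isEmpty ||
        !(((pI.1.drop 1).drop n).isPrefixOf pJ.2) ||
        ((((pI.1.drop 1).take n == ['/']) && (pJ.1.drop 1 == "html".toList || pJ.1.drop 1 == "body".toList || pJ.1.drop 1 == "div".toList))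
         || (((pI.1.drop 1).take n == "/htm".toList) && (pJ.1.drop 1 == "link".toList))
         || (((pI.1.drop 1).take n == "scrip".toList) && (pJ.1.drop 1 == "title".toList))))))) = true := by
  decide

theorem pvF_span : ∀ pJ ∈ pvRulesC, ∀ pI ∈ pvRulesC, [pJ, pI].Sublist pvRulesC →
    ∀ n, n < 8 → (pI.1.drop 1).drop n ≠ [] → ((pI.1.drop 1).drop n) <+: pJ.2 →
    pvSpanConc ((pI.1.drop 1).take n) (pJ.1.drop 1) := by
  intro pJ hJ pI hI hsub n hn hne hpre
  have hb := pvF_span_b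
  rw [List.all_eq_true] at hb
  have h1 := hb _ hJ
  rw [List.all_eq_true] at h1
  have h2 := h1 _ hI
  rw [← List.isSublist_iff_sublist] at hsub
  simp only [hsub, Bool.not_true, Bool.false_or] at h2
  rw [List.all_eq_true] at h2
  have h3 := h2 n (List.mem_range.mpr hn)
  have hpre' : ((pI.1.drop 1).drop n).isPrefixOf pJ.2 = true := List.isPrefixOf_iff_prefix.mpr hpre
  simp only [Bool.or_eq_true, List.isEmpty_iff, Bool.not_eq_true', Bool.and_eq_true,
    beq_iff_eq, hne, hpre'] at h3
  unfold pvSpanConc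
  tauto

theorem pvF_nostrict_b :
    (pvRulesC.all (fun pJ => pvRulesC.all (fun pI =>
      (List.range 8).all (fun n =>
        !(pJ.2.isPrefixOf ((pI.1.drop 1).drop n)) || (pJ.2 == (pI.1.drop 1).drop n))))) = true := by
  decide

theorem pvF_nostrict : ∀ pJ ∈ pvRulesC, ∀ pI ∈ pvRulesC, ∀ n, n < 8 →
    pJ.2 <+: ((pI.1.drop 1).drop n) → pJ.2 = (pI.1.drop 1).drop n := by
  intro pJ hJ pI hI n hn hpre
  have hb := pvF_nostrict_b
  rw [List.all_eq_true] at hb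
  have h1 := hb _ hJ
  rw [List.all_eq_true] at h1
  have h2 := h1 _ hI
  rw [List.all_eq_true] at h2
  have h3 := h2 n (List.mem_range.mpr hn)
  have hpre' : pJ.2.isPrefixOf ((pI.1.drop 1).drop n) = true := List.isPrefixOf_iff_prefix.mpr hpre
  simp only [Bool.or_eq_true, Bool.not_eq_true', beq_iff_eq, hpre'] at h3
  tauto

theorem pvPrefix_cases {a b c : List Char} (h : a <+: b ++ c) :
    a <+: b ∨ (b <+: a ∧ a.drop b.length <+: c) := by
  by_cases hle : a.length ≤ b.length
  · exact Or.inl (List.prefix_of_prefix_length_le h (b.prefix_append c) hle)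
  · have hba : b <+: a :=
      List.prefix_of_prefix_length_le (b.prefix_append c) h (le_of_not_ge hle)
    refine Or.inr ⟨hba, ?_⟩
    have ha : b ++ a.drop b.length = a := List.prefix_iff_eq_append.mp hba
    rw [← ha] at h
    exact (List.prefix_append_right_inj b).mp h

-- a still-pending rule never matches across a pending block boundary
theorem pvNoSpan (k o : List Char) (hk : (k, o) ∈ pvRulesC)
    (P : List (List Char × List Char))
    (hP : ∀ r ∈ P, r ∈ pvRulesC ∧ [r, (k, o)].Sublist pvRulesC)
    (st : List PvSlot)
    (hwf : pvWF P st)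
    (q : List Char) (_hq : '<' ∉ q)
    (hnm : ¬ (k.drop 1) <+: q)
    (hhead : ∀ sl, st.head? = some sl → ¬ pvBad q (pvQ sl)) :
    ¬ (k.drop 1) <+: q ++ pvRender st := by
  intro hpre
  obtain ⟨hkh, hkfree, hkne, -, -, hklen⟩ := pvF_shape _ hk
  rcases pvPrefix_cases hpre with h | ⟨hqk, hd⟩
  · exact hnm h
  -- k.drop 1 = q ++ d with d nonempty, d <+: pvRender st
  set ti := k.drop 1 with hti
  set d := ti.drop q.length with hdd
  have hdne : d ≠ [] := by
    intro h0
    have : ti <+: q := by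
      have ha : q ++ d = ti := List.prefix_iff_eq_append.mp hqk
      rw [h0, List.append_nil] at ha
      exact ha ▸ List.prefix_refl _
    exact hnm this
  have hdfree : '<' ∉ d := fun hm => hkfree (List.mem_of_mem_drop hm)
  have hqlen : q.length < ti.length := by
    have := hqk.length_le
    have h2 : d.length ≠ 0 := fun h0 => hdne (List.length_eq_zero_iff.mp h0)
    have h3 : d.length = ti.length - q.length := by simp [hdd]
    omega
  cases st with
  | nil =>
    simp [pvRender] at hd
    exact hdne hd
  | cons sl st' =>
    cases sl with
    | pend q' =>
      have : pvRender (PvSlot.pend q' :: st') = '<' :: (q' ++ pvRender st') := by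
        simp [pvRender, pvRenderS]
      rw [this] at hd
      cases hdc : d with
      | nil => exact hdne hdc
      | cons x d' =>
        rw [hdc] at hd
        rcases hd with ⟨r, hr⟩
        simp at hr
        exact hdfree (by rw [hdc, ← hr.1]; exact List.mem_cons_self ..)
    | done kj oj q' =>
      obtain ⟨-, hdone⟩ := hwf _ (List.mem_cons_self ..)
      obtain ⟨hjP, hjpre⟩ := hdone kj oj q' rfl
      obtain ⟨hjR, hjsub⟩ := hP _ hjP
      have hrw : pvRender (PvSlot.done kj oj q' :: st') = oj ++ (q'.drop (kj.length - 1) ++ pvRender st') := by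
        simp [pvRender, pvRenderS]
      rw [hrw] at hd
      have hqeq : (ti.take q.length) = q := by
        have ha : q ++ d = ti := List.prefix_iff_eq_append.mp hqk
        rw [← ha]
        simp [hdd]
      have hk7 : k.length ≤ 7 := hklen
      have htilen : ti.length ≤ 6 := by
        have h6 : ti.length = k.length - 1 := by simp [hti]
        omega
      have hcase : d <+: oj → False := by
        intro h
        have hspan := pvF_span (kj, oj) hjR (k, o) hk hjsub q.length (by omega)
          (by rw [← hti, ← hdd]; exact hdne) (by rw [← hti, ← hdd]; exact h)
        rw [hqeq] at hspan
        have hbad : pvBad q (pvQ (PvSlot.done kj oj q')) := by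
          unfold pvBad
          unfold pvSpanConc at hspan
          have hq' : pvQ (PvSlot.done kj oj q') = q' := rfl
          rw [hq']
          rcases hspan with ⟨h1, h2 | h2 | h2⟩ | ⟨h1, h2⟩ | ⟨h1, h2⟩
          · exact Or.inl ⟨h1, Or.inl (h2 ▸ hjpre)⟩
          · exact Or.inl ⟨h1, Or.inr (Or.inl (h2 ▸ hjpre))⟩
          · exact Or.inl ⟨h1, Or.inr (Or.inr (h2 ▸ hjpre))⟩
          · exact Or.inr (Or.inl ⟨h1, h2 ▸ hjpre⟩)
          · exact Or.inr (Or.inr ⟨h1, h2 ▸ hjpre⟩)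
        exact hhead _ rfl hbad
      rcases pvPrefix_cases hd with h | ⟨hoj, -⟩
      · exact hcase h
      · have heq : oj = d := pvF_nostrict (kj, oj) hjR (k, o) hk q.length (by omega)
          (by rw [← hti, ← hdd]; exact hoj)
        exact hcase (heq ▸ List.prefix_refl d)

theorem pvQ_step (k o : List Char) (sl : PvSlot) : pvQ (pvStep k o sl) = pvQ sl := by
  cases sl with
  | pend q =>
    by_cases h : (k.drop 1).isPrefixOf q = true
    · simp only [pvStep]; rw [if_pos h]; rfl
    · simp only [pvStep]; rw [if_neg h]
  | done kj oj q => rfl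

theorem pvCommute (k o : List Char) (hk : (k, o) ∈ pvRulesC)
    (P : List (List Char × List Char))
    (hP : ∀ r ∈ P, r ∈ pvRulesC ∧ [r, (k, o)].Sublist pvRulesC) :
    ∀ st, pvWF P st → List.IsChain (fun a b => ¬ pvBad (pvQ a) (pvQ b)) st →
      pvRepl k o (pvRender st) = pvRender (st.map (pvStep k o)) := by
  intro st
  induction st with
  | nil => intro _ _; simp [pvRender]; rw [pvRepl]
  | cons sl st' ih =>
    intro hwf hch
    have hwf' : pvWF P st' := fun x hx => hwf x (List.mem_cons_of_mem _ hx)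
    have hch' : List.IsChain (fun a b => ¬ pvBad (pvQ a) (pvQ b)) st' := hch.tail
    obtain ⟨hkh, hkfree, hkne, hofree, hone, hklen⟩ := pvF_shape _ hk
    obtain ⟨tk, hkeq⟩ : ∃ tk, k = '<' :: tk := by
      cases k with
      | nil => simp at hkh
      | cons a b => simp at hkh; exact ⟨b, by rw [hkh]⟩
    have htk : k.drop 1 = tk := by rw [hkeq]; rfl
    cases sl with
    | done kj oj q' =>
      obtain ⟨hq'free, hdone⟩ := hwf _ (List.mem_cons_self ..)
      obtain ⟨hjP, -⟩ := hdone kj oj q' rfl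
      obtain ⟨hjR, -⟩ := hP _ hjP
      obtain ⟨-, -, -, hojfree, -, -⟩ := pvF_shape _ hjR
      have hfree : '<' ∉ (oj ++ q'.drop (kj.length - 1)) := by
        intro hm
        rcases List.mem_append.mp hm with h | h
        · exact hojfree h
        · exact hq'free (List.mem_of_mem_drop h)
      have hrw : pvRender (PvSlot.done kj oj q' :: st')
          = (oj ++ q'.drop (kj.length - 1)) ++ pvRender st' := by
        simp [pvRender, pvRenderS]
      rw [hrw, pvRepl_ltfree k o hkh _ _ hfree, ih hwf' hch']
      simp [pvRender, pvRenderS, pvStep]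
    | pend q' =>
      have hq'free : '<' ∉ q' := (hwf _ (List.mem_cons_self ..)).1
      have hrw : pvRender (PvSlot.pend q' :: st') = '<' :: (q' ++ pvRender st') := by
        simp [pvRender, pvRenderS]
      by_cases hm : (k.drop 1).isPrefixOf q'
      · have hmp : tk <+: q' := by rw [← htk]; exact List.isPrefixOf_iff_prefix.mp hm
        have hpre : k.isPrefixOf ('<' :: (q' ++ pvRender st')) = true := by
          rw [hkeq, List.isPrefixOf_iff_prefix]
          exact List.cons_prefix_cons.mpr ⟨rfl, hmp.trans (q'.prefix_append _)⟩
        have hdrop : (q' ++ pvRender st').drop (k.length - 1)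
            = q'.drop (k.length - 1) ++ pvRender st' := by
          rw [List.drop_append]
          have : k.length - 1 ≤ q'.length := by
            have := hmp.length_le
            rw [hkeq]
            simp
            omega
          rw [Nat.sub_eq_zero_of_le this]
          simp
        rw [hrw, pvRepl]
        simp only [hpre, if_true]
        rw [hdrop, pvRepl_ltfree k o hkh _ _ (fun h => hq'free (List.mem_of_mem_drop h)),
          ih hwf' hch']
        have hstep : pvStep k o (PvSlot.pend q') = PvSlot.done k o q' := by
          simp only [pvStep]
          rw [if_pos hm]
        rw [List.map_cons, hstep]
        simp [pvRender, pvRenderS]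
      · have hhead : ∀ sl2, st'.head? = some sl2 → ¬ pvBad q' (pvQ sl2) := by
          intro sl2 h2
          cases st' with
          | nil => simp at h2
          | cons a b =>
            simp at h2
            subst h2
            exact (List.isChain_cons_cons.mp hch).1
        have hns := pvNoSpan k o hk P hP st' hwf' q' hq'free
          (fun h => hm (List.isPrefixOf_iff_prefix.mpr h)) hhead
        have hnpre : ¬ k.isPrefixOf ('<' :: (q' ++ pvRender st')) = true := by
          rw [hkeq, List.isPrefixOf_iff_prefix]
          intro h
          exact hns (by rw [htk]; exact (List.cons_prefix_cons.mp h).2)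
        rw [hrw, pvRepl]
        simp only [hnpre]
        rw [pvRepl_ltfree k o hkh _ _ hq'free, ih hwf' hch']
        have hstep : pvStep k o (PvSlot.pend q') = PvSlot.pend q' := by
          simp only [pvStep]
          rw [if_neg hm]
        rw [List.map_cons, hstep]
        simp [pvRender, pvRenderS]

theorem pvWF_step (P : List (List Char × List Char)) (k o : List Char) (st : List PvSlot)
    (hwf : pvWF P st) : pvWF (P ++ [(k, o)]) (st.map (pvStep k o)) := by
  intro sl hsl
  rcases List.mem_map.mp hsl with ⟨sl0, hsl0, rfl⟩
  obtain ⟨hfree, hdone⟩ := hwf _ hsl0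
  cases sl0 with
  | done kj oj q =>
    refine ⟨hfree, ?_⟩
    intro k1 o1 q1 heq
    obtain ⟨h1, h2⟩ := hdone k1 o1 q1 heq
    exact ⟨List.mem_append_left _ h1, h2⟩
  | pend q =>
    by_cases hm : (k.drop 1).isPrefixOf q = true
    · have hstep : pvStep k o (PvSlot.pend q) = PvSlot.done k o q := by
        simp only [pvStep]; rw [if_pos hm]
      rw [hstep]
      refine ⟨hfree, ?_⟩
      intro k1 o1 q1 heq
      cases heq
      exact ⟨List.mem_append_right _ (List.mem_cons_self ..),
        List.isPrefixOf_iff_prefix.mp hm⟩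
    · have hstep : pvStep k o (PvSlot.pend q) = PvSlot.pend q := by
        simp only [pvStep]; rw [if_neg hm]
      rw [hstep]
      refine ⟨hfree, ?_⟩
      intro k1 o1 q1 heq
      cases heq

theorem pvChain_step (k o : List Char) (st : List PvSlot)
    (h : List.IsChain (fun a b => ¬ pvBad (pvQ a) (pvQ b)) st) :
    List.IsChain (fun a b => ¬ pvBad (pvQ a) (pvQ b)) (st.map (pvStep k o)) := by
  refine (List.isChain_map (pvStep k o)).mpr ?_
  simp only [pvQ_step]
  exact h

theorem pvFold (p0 : List Char) (hp0 : '<' ∉ p0) :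
    ∀ (l2 l1 : List (List Char × List Char)), pvRulesC = l1 ++ l2 →
      ∀ st, pvWF l1 st → List.IsChain (fun a b => ¬ pvBad (pvQ a) (pvQ b)) st →
      l2.foldl (fun s r => pvRepl r.1 r.2 s) (p0 ++ pvRender st)
        = p0 ++ pvRender (l2.foldl (fun st r => st.map (pvStep r.1 r.2)) st) := by
  intro l2
  induction l2 with
  | nil => intro l1 _ st _ _; simp
  | cons r l2' ih =>
    intro l1 hsplit st hwf hch
    rcases r with ⟨rk, ro⟩
    have hkmem : (rk, ro) ∈ pvRulesC := by
      rw [hsplit]; exact List.mem_append_right _ (List.mem_cons_self ..)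
    have hP : ∀ rr ∈ l1, rr ∈ pvRulesC ∧ [rr, (rk, ro)].Sublist pvRulesC := by
      intro rr hrr
      refine ⟨by rw [hsplit]; exact List.mem_append_left _ hrr, ?_⟩
      rw [hsplit]
      have h1 : List.Sublist [rr] l1 := List.singleton_sublist.mpr hrr
      have h2 : List.Sublist [(rk, ro)] ((rk, ro) :: l2') := List.singleton_sublist.mpr (List.mem_cons_self ..)
      exact h1.append h2
    obtain ⟨hkh, -, -, -, -, -⟩ := pvF_shape _ hkmem
    rw [List.foldl_cons]
    have hstep1 : pvRepl rk ro (p0 ++ pvRender st) = p0 ++ pvRender (st.map (pvStep rk ro)) := by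
      rw [pvRepl_ltfree rk ro hkh _ _ hp0, pvCommute rk ro hkmem l1 hP st hwf hch]
    rw [hstep1]
    exact ih (l1 ++ [(rk, ro)]) (by rw [hsplit]; simp) _
      (pvWF_step l1 rk ro st hwf) (pvChain_step rk ro st hch)

theorem pvFoldSlot_done (kj oj q : List Char) :
    ∀ l : List (List Char × List Char),
      l.foldl (fun sl r => pvStep r.1 r.2 sl) (PvSlot.done kj oj q) = PvSlot.done kj oj q := by
  intro l
  induction l with
  | nil => rfl
  | cons r l' ih => rw [List.foldl_cons]; exact ih

theorem pvFoldSlot (q : List Char) :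
    ∀ l : List (List Char × List Char),
      l.foldl (fun sl r => pvStep r.1 r.2 sl) (PvSlot.pend q)
        = (match l.find? (fun p => (p.1.drop 1).isPrefixOf q) with
           | some p => PvSlot.done p.1 p.2 q
           | none => PvSlot.pend q) := by
  intro l
  induction l with
  | nil => rfl
  | cons r l' ih =>
    rw [List.foldl_cons, List.find?_cons]
    by_cases hm : (r.1.drop 1).isPrefixOf q = true
    · have hstep : pvStep r.1 r.2 (PvSlot.pend q) = PvSlot.done r.1 r.2 q := by
        simp only [pvStep]; rw [if_pos hm]
      rw [hstep, pvFoldSlot_done, hm]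
    · have hstep : pvStep r.1 r.2 (PvSlot.pend q) = PvSlot.pend q := by
        simp only [pvStep]; rw [if_neg hm]
      rw [hstep, ih]
      have : (r.1.drop 1).isPrefixOf q = false := by
        cases hx : (r.1.drop 1).isPrefixOf q
        · rfl
        · exact absurd hx hm
      rw [this]

theorem pvMapFold :
    ∀ (l : List (List Char × List Char)) (st : List PvSlot),
      l.foldl (fun st r => st.map (pvStep r.1 r.2)) st
        = st.map (fun sl => l.foldl (fun sl r => pvStep r.1 r.2 sl) sl) := by
  intro l
  induction l with
  | nil => intro st; simp
  | cons r l' ih =>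
    intro st
    rw [List.foldl_cons, ih, List.map_map]
    simp [List.foldl_cons, Function.comp]

theorem pvFind_congr {α : Type} (p1 p2 : α → Bool) :
    ∀ l : List α, (∀ x ∈ l, p1 x = p2 x) → l.find? p1 = l.find? p2 := by
  intro l
  induction l with
  | nil => intro _; rfl
  | cons a l' ih =>
    intro h
    rw [List.find?_cons, List.find?_cons, h a (List.mem_cons_self ..)]
    cases p2 a
    · exact ih (fun x hx => h x (List.mem_cons_of_mem _ hx))
    · rfl

-- no rule matches across a block boundary in the ORIGINAL string either
theorem pvMatch_block (tp q rest : List Char) (htp : '<' ∉ tp) (_hq : '<' ∉ q)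
    (hrest : rest = [] ∨ ∃ u, rest = '<' :: u) :
    (tp <+: q ++ rest) ↔ tp <+: q := by
  constructor
  · intro h
    rcases pvPrefix_cases h with h1 | ⟨h1, h2⟩
    · exact h1
    · set d := tp.drop q.length with hd
      by_cases hdn : d = []
      · have : tp.length ≤ q.length := by
          have h3 : d.length = tp.length - q.length := by simp [hd]
          have : d.length = 0 := by rw [hdn]; rfl
          omega
        exact List.prefix_of_prefix_length_le h (q.prefix_append rest) (by
          have := this
          omega)
      · exfalso
        rcases hrest with hr | ⟨u, hr⟩
        · rw [hr] at h2
          exact hdn (List.prefix_nil.mp h2)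
        · rw [hr] at h2
          cases hdc : d with
          | nil => exact hdn hdc
          | cons x d' =>
            rw [hdc] at h2
            have hx : x = '<' := (List.cons_prefix_cons.mp h2).1
            apply htp
            have : x ∈ d := by rw [hdc]; exact List.mem_cons_self ..
            rw [hx] at this
            exact List.mem_of_mem_drop this
  · intro h
    exact h.trans (q.prefix_append rest)

theorem pvScan_copy : ∀ (p z : List Char), '<' ∉ p → pvScan (p ++ z) = p ++ pvScan z := by
  intro p
  induction p with
  | nil => intro z _; rfl
  | cons c p' ih =>
    intro z hp
    have hc : ¬ c = '<' := fun h => hp (h ▸ List.mem_cons_self ..)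
    rw [List.cons_append, pvScan]
    simp only [hc, if_false]
    rw [ih z (fun h => hp (List.mem_cons_of_mem _ h))]
    rfl

theorem pvScan_blocks : ∀ bl : List (List Char), (∀ q ∈ bl, '<' ∉ q) →
    pvScan (bl.flatMap (fun q => '<' :: q)) = bl.flatMap pvHb := by
  intro bl
  induction bl with
  | nil => intro _; simp [pvScan]
  | cons q bl' ih =>
    intro hfree
    have hqf : '<' ∉ q := hfree q (List.mem_cons_self ..)
    have hrest : bl'.flatMap (fun q => '<' :: q) = [] ∨
        ∃ u, bl'.flatMap (fun q => '<' :: q) = '<' :: u := by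
      cases bl' with
      | nil => exact Or.inl rfl
      | cons q2 bl'' => exact Or.inr ⟨q2 ++ bl''.flatMap (fun q => '<' :: q), by simp⟩
    rw [List.flatMap_cons, List.cons_append, pvScan]
    simp only [if_pos rfl]
    have hcongr : pvRulesC.find? (fun p => p.1.isPrefixOf ('<' :: (q ++ bl'.flatMap (fun q => '<' :: q))))
        = pvRulesC.find? (fun p => (p.1.drop 1).isPrefixOf q) := by
      apply pvFind_congr
      intro r hr
      obtain ⟨hh, hfree1, -, -, -, -⟩ := pvF_shape _ hr
      obtain ⟨tp, hre⟩ : ∃ tp, r.1 = '<' :: tp := by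
        cases hrk : r.1 with
        | nil => rw [hrk] at hh; simp at hh
        | cons a b =>
          rw [hrk] at hh
          simp at hh
          exact ⟨b, by rw [hh]⟩
      have htp : '<' ∉ tp := by rw [hre] at hfree1; simpa using hfree1
      have hiff := pvMatch_block tp q _ htp hqf hrest
      rw [hre]
      simp only [List.drop_succ_cons, List.drop_zero]
      cases hb : tp.isPrefixOf q
      · cases hb2 : ('<' :: tp).isPrefixOf ('<' :: (q ++ bl'.flatMap (fun q => '<' :: q)))
        · rfl
        · exfalso
          have := List.isPrefixOf_iff_prefix.mp hb2
          have h2 := hiff.mp (List.cons_prefix_cons.mp this).2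
          rw [← List.isPrefixOf_iff_prefix] at h2
          rw [h2] at hb
          exact Bool.false_ne_true hb.symm
      · have h2 := List.isPrefixOf_iff_prefix.mp hb
        have h3 : ('<' :: tp) <+: ('<' :: (q ++ bl'.flatMap (fun q => '<' :: q))) :=
          List.cons_prefix_cons.mpr ⟨rfl, hiff.mpr h2⟩
        rw [← List.isPrefixOf_iff_prefix] at h3
        rw [h3]
    rw [hcongr, List.flatMap_cons]
    cases hf : pvRulesC.find? (fun p => (p.1.drop 1).isPrefixOf q) with
    | none =>
      have hhb : pvHb q = '<' :: q := by unfold pvHb; rw [hf]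
      rw [if_pos trivial]
      simp only []
      rw [pvScan_copy q _ hqf, ih (fun x hx => hfree x (List.mem_cons_of_mem _ hx)), hhb]
      rfl
    | some r =>
      rcases r with ⟨rk, ro⟩
      have hhb : pvHb q = ro ++ q.drop (rk.length - 1) := by unfold pvHb; rw [hf]
      have hpred := List.find?_some hf
      have hmem := List.mem_of_find?_eq_some hf
      obtain ⟨hh, -, -, -, -, -⟩ := pvF_shape _ hmem
      obtain ⟨tp, hre⟩ : ∃ tp, rk = '<' :: tp := by
        cases hrk : rk with
        | nil => rw [hrk] at hh; simp at hh
        | cons a b =>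
          rw [hrk] at hh
          simp at hh
          exact ⟨b, by rw [hh]⟩
      have hpre : tp <+: q := by
        have := List.isPrefixOf_iff_prefix.mp hpred
        rw [hre] at this
        simpa using this
      have hdrop : ('<' :: (q ++ bl'.flatMap (fun q => '<' :: q))).drop rk.length
          = q.drop (rk.length - 1) ++ bl'.flatMap (fun q => '<' :: q) := by
        rw [hre]
        simp only [List.length_cons, List.drop_succ_cons]
        rw [List.drop_append]
        have : tp.length ≤ q.length := hpre.length_le
        rw [Nat.sub_eq_zero_of_le this]
        simp
      rw [if_pos trivial]
      simp only []
      rw [hdrop, pvScan_copy _ _ (fun h => hqf (List.mem_of_mem_drop h)),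
        ih (fun x hx => hfree x (List.mem_cons_of_mem _ hx)), hhb]
      simp

theorem pvRenderFinal : ∀ bl : List (List Char),
    pvRender ((bl.map PvSlot.pend).map
        (fun sl => pvRulesC.foldl (fun sl r => pvStep r.1 r.2 sl) sl))
      = bl.flatMap pvHb := by
  intro bl
  induction bl with
  | nil => rfl
  | cons q bl' ih =>
    simp only [List.map_cons, List.flatMap_cons]
    have : pvRender ((pvRulesC.foldl (fun sl r => pvStep r.1 r.2 sl) (PvSlot.pend q))
        :: (bl'.map PvSlot.pend).map (fun sl => pvRulesC.foldl (fun sl r => pvStep r.1 r.2 sl) sl))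
        = pvRenderS (pvRulesC.foldl (fun sl r => pvStep r.1 r.2 sl) (PvSlot.pend q))
          ++ pvRender ((bl'.map PvSlot.pend).map (fun sl => pvRulesC.foldl (fun sl r => pvStep r.1 r.2 sl) sl)) := by
      simp [pvRender]
    rw [this, ih, pvFoldSlot]
    unfold pvHb
    cases hf : pvRulesC.find? (fun p => (p.1.drop 1).isPrefixOf q) with
    | none => rfl
    | some r => rfl

theorem pvBadPat (q q' : List Char) (hbad : pvBad q q') :
    ∃ p ∈ pvPats, p <+: ('<' :: q ++ '<' :: q') := by
  unfold pvBad at hbad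
  rcases hbad with ⟨h1, h2 | h2 | h2⟩ | ⟨h1, h2⟩ | ⟨h1, h2⟩ <;> subst h1 <;>
    obtain ⟨r, hr⟩ := h2
  · exact ⟨"</<html".toList, by decide, r, by rw [← hr]; rfl⟩
  · exact ⟨"</<body".toList, by decide, r, by rw [← hr]; rfl⟩
  · exact ⟨"</<div".toList, by decide, r, by rw [← hr]; rfl⟩
  · exact ⟨"</htm<link".toList, by decide, r, by rw [← hr]; rfl⟩
  · exact ⟨"<scrip<title".toList, by decide, r, by rw [← hr]; rfl⟩

theorem pvChainBlocks : ∀ s : List Char, (∀ p ∈ pvPats, ¬ p <:+: s) →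
    (s.head? = some '<' ∨ s = []) →
    List.IsChain (fun q q' => ¬ pvBad q q') (pvBlocks s) := by
  intro s
  induction s using pvBlocks.induct with
  | case1 => intro _ _; simp [pvBlocks]
  | case2 c t ih =>
    intro hpre hh
    rcases hh with hh | hh
    · simp at hh
      subst hh
      rw [pvBlocks]
      have hts : List.takeWhile (fun x => decide (x ≠ '<')) t
          ++ List.dropWhile (fun x => decide (x ≠ '<')) t = t :=
        List.takeWhile_append_dropWhile
      by_cases hemp : t.dropWhile (fun x => decide (x ≠ '<')) = []
      · rw [hemp, pvBlocks]
        exact List.isChain_singleton _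
      · have hhead : (t.dropWhile (fun x => decide (x ≠ '<'))).head hemp = '<' := by
          have := List.head_dropWhile_not (p := fun x => decide (x ≠ '<')) hemp
          simpa using this
        have hh2 : (t.dropWhile (fun x => decide (x ≠ '<'))).head? = some '<' := by
          rw [List.head?_eq_some_head hemp, hhead]
        have hpre' : ∀ p ∈ pvPats, ¬ p <:+: t.dropWhile (fun x => decide (x ≠ '<')) := by
          intro p hp hinf
          exact hpre p hp (hinf.trans (((List.dropWhile_suffix _).trans (List.suffix_cons '<' t)).isInfix))
        have hchain' := ih hpre' (Or.inl hh2)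
        obtain ⟨u, hu⟩ : ∃ u, t.dropWhile (fun x => decide (x ≠ '<')) = '<' :: u := by
          cases hdc : t.dropWhile (fun x => decide (x ≠ '<')) with
          | nil => exact absurd hdc hemp
          | cons a b =>
            rw [hdc] at hh2
            simp at hh2
            exact ⟨b, by rw [hh2]⟩
        rw [hu, pvBlocks]
        rw [hu, pvBlocks] at hchain'
        refine List.isChain_cons_cons.mpr ⟨?_, hchain'⟩
        intro hbad
        obtain ⟨p, hp, hppre⟩ := pvBadPat _ _ hbad
        apply hpre p hp
        have h1 : ('<' :: t.takeWhile (fun x => decide (x ≠ '<')) ++ '<' :: u.takeWhile (fun x => decide (x ≠ '<')))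
            <+: ('<' :: t) := by
          conv_rhs => rw [← hts, hu]
          set tU := u.takeWhile (fun x => decide (x ≠ '<')) with hTU
          obtain ⟨r, hr⟩ := List.takeWhile_prefix (l := u) (p := fun x => decide (x ≠ '<'))
          refine ⟨r, ?_⟩
          rw [← hr]
          simp [hTU]
        exact (hppre.trans h1).isInfix
    · simp at hh

theorem pvFoldStr : ∀ (l : List (String × String)) (x : String),
    (l.foldl (fun acc p => PySem.Str.replace acc p.1 p.2) x).toList
      = (l.map (fun p => (p.1.toList, p.2.toList))).foldl
          (fun acc p => PySem.Chars.replace acc p.1 p.2) x.toList := by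
  intro l
  induction l with
  | nil => intro x; rfl
  | cons r l' ih =>
    intro x
    rw [List.foldl_cons, List.map_cons, List.foldl_cons, ih, PySem.Str.toList_replace]

theorem pvRulesC_eq : pvRules.map (fun p => (p.1.toList, p.2.toList)) = pvRulesC := by decide

theorem pvFoldRepl : ∀ (l : List (List Char × List Char)), (∀ r ∈ l, 0 < r.1.length) →
    ∀ x, l.foldl (fun acc r => PySem.Chars.replace acc r.1 r.2) x
      = l.foldl (fun s r => pvRepl r.1 r.2 s) x := by
  intro l
  induction l with
  | nil => intro _ x; rfl
  | cons r l' ih =>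
    intro h x
    rw [List.foldl_cons, List.foldl_cons,
      pvReplace_eq r.1 r.2 x (by
        intro h0
        have := h r (List.mem_cons_self ..)
        rw [h0] at this
        simp at this)]
    exact ih (fun rr hrr => h rr (List.mem_cons_of_mem _ hrr)) _

theorem pvDropWhile_head (s : List Char)
    (h : ¬ s.dropWhile (fun x => decide (x ≠ '<')) = []) :
    (s.dropWhile (fun x => decide (x ≠ '<'))).head? = some '<' := by
  have hhead : (s.dropWhile (fun x => decide (x ≠ '<'))).head h = '<' := by
    have := List.head_dropWhile_not (p := fun x => decide (x ≠ '<')) h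
    simpa using this
  rw [List.head?_eq_some_head h, hhead]

-- the two sides agree on the underlying character lists
theorem pvMain (s : List Char) (hpre : ∀ p ∈ pvPats, ¬ p <:+: s) :
    pvRulesC.foldl (fun acc r => pvRepl r.1 r.2 acc) s = pvScan s := by
  have hts : List.takeWhile (fun x => decide (x ≠ '<')) s
      ++ List.dropWhile (fun x => decide (x ≠ '<')) s = s := List.takeWhile_append_dropWhile
  set p0 := List.takeWhile (fun x => decide (x ≠ '<')) s with hp0def
  set s1 := List.dropWhile (fun x => decide (x ≠ '<')) s with hs1def
  have hp0 : '<' ∉ p0 := by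
    intro h
    have := List.mem_takeWhile_imp h
    simp at this
  have hpre1 : ∀ p ∈ pvPats, ¬ p <:+: s1 := by
    intro p hp hinf
    exact hpre p hp (hinf.trans (List.dropWhile_suffix _).isInfix)
  by_cases hemp : s1 = []
  · have hs : s = p0 := by rw [← hts, hemp, List.append_nil]
    have hfold := pvFold p0 hp0 pvRulesC [] (by simp) [] (by intro sl hsl; cases hsl)
      (by simp)
    have hr0 : pvRender ([] : List PvSlot) = [] := rfl
    rw [hr0, List.append_nil] at hfold
    have hmaps : pvRulesC.foldl (fun st r => st.map (pvStep r.1 r.2)) ([] : List PvSlot) = [] := by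
      rw [pvMapFold]
      rfl
    rw [hmaps, hr0, List.append_nil] at hfold
    have hscan : pvScan p0 = p0 := by
      have h2 := pvScan_copy p0 [] hp0
      rw [List.append_nil] at h2
      rw [h2]
      simp [pvScan]
    rw [hs, hfold, hscan]
  · have hhead : s1.head? = some '<' := pvDropWhile_head s hemp
    have hjoin := pvBlocks_join s1 hhead
    have hfree := pvBlocks_ltfree s1
    have hch := pvChainBlocks s1 hpre1 (Or.inl hhead)
    set bl := pvBlocks s1 with hbl
    set st0 : List PvSlot := bl.map PvSlot.pend with hst0
    have hrender0 : pvRender st0 = bl.flatMap (fun q => '<' :: q) := by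
      unfold pvRender
      rw [hst0, List.flatMap_map]
      rfl
    have hwf0 : pvWF [] st0 := by
      intro sl hsl
      rw [hst0] at hsl
      rcases List.mem_map.mp hsl with ⟨q, hq, rfl⟩
      exact ⟨hfree q hq, fun k o q' heq => by cases heq⟩
    have hch0 : List.IsChain (fun a b => ¬ pvBad (pvQ a) (pvQ b)) st0 := by
      rw [hst0]
      refine (List.isChain_map PvSlot.pend).mpr ?_
      simpa [pvQ] using hch
    have hfold := pvFold p0 hp0 pvRulesC [] (by simp) st0 hwf0 hch0
    rw [hrender0, ← hjoin] at hfold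
    rw [hts] at hfold
    rw [hfold, pvMapFold, hst0, pvRenderFinal]
    conv_rhs => rw [← hts]
    rw [pvScan_copy p0 s1 hp0]
    conv_rhs => rw [hjoin]
    rw [pvScan_blocks bl hfree]

-- ===== VERDICT (by name: the statement is the Claim_ definition above) =====
theorem valid_content_spec : Claim_equal_valid_content := by
  intro content _hdom hpre
  unfold Spec_valid_content
  apply String.toList_inj.mp
  have halt : (valid_content_alt content).toList = pvScan content.toList := by
    unfold valid_content_alt
    simp
  have ha : (valid_content content).toList
      = pvRulesC.foldl (fun acc r => pvRepl r.1 r.2 acc) content.toList := by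
    unfold valid_content
    rw [pvFoldStr, pvRulesC_eq, pvFoldRepl pvRulesC pvRulesC_key_pos]
  rw [ha, halt]
  exact pvMain content.toList hpre
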